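-- pv_equiv track=rewrite | github.com/xiye17/NaiveHotpotBaseline | convert_hp_to_squad.py | construct_context_and_title
-- ===== SOURCE A (Python) =====
-- def construct_context_and_title(documents, supporting_titles, answer_text):
--     supporting_docs = [x for x in documents if x[0] in supporting_titles]
--     supporting_docs = [(x[0], ''.join(x[1])) for x in supporting_docs]
--     if not any([answer_text in x[1] for x in supporting_docs]):
--         return None, None
--     supporting_docs.sort(key=lambda x: answer_text in x[1], reverse=True)
--
--     title = f'{supporting_docs[0][0]}, {supporting_docs[1][0]}'
--     context = f'{supporting_docs[0][1]} {supporting_docs[1][1]}'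
--     return context, title
-- ===== SOURCE B (Python) =====
-- def construct_context_and_title(documents, supporting_titles, answer_text):
--     front = []
--     back = []
--     for title, sents in documents:
--         if title in supporting_titles:
--             text = ''.join(sents)
--             if answer_text in text:
--                 front.append((title, text))
--             else:
--                 back.append((title, text))
--     if not front:
--         return None, None
--     ordered = front + back
--     t0, c0 = ordered[0]
--     t1, c1 = ordered[1]
--     return f'{c0} {c1}', f'{t0}, {t1}'
-- ===== Notes on version B (the rewrite author's own statement) =====
-- stated objective: simpler
-- what changed: Replaces A's staged passes (filter, map-join, any-scan, stable boolean-key reverse sort) with ONE loop over documents that joins each supporting doc and appends it to a 'front' or 'back' accumulator depending on whether it contains the answer; the concatenation front+back is exactly A's stable sort order.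
import Mathlib
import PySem

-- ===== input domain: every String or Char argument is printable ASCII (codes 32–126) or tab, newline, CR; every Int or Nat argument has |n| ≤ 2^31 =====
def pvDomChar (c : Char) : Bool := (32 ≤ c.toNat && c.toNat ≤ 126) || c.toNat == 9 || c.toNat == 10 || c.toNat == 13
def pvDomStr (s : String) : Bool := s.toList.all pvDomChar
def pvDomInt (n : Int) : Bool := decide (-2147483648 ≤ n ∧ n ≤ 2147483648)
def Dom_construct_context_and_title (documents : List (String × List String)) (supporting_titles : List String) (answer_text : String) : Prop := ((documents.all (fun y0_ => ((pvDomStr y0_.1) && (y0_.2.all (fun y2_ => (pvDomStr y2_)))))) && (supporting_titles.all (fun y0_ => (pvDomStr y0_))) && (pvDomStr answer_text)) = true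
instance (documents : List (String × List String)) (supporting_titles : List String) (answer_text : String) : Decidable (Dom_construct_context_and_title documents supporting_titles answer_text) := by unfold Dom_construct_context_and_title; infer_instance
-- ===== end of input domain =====

-- B replaces A's staged passes (filter, map-join, any, stable boolean-key reverse sort) by ONE
-- loop that routes each supporting doc into a front/back accumulator; objective: simpler.
-- Equivalence is about the RETURN value; A sorts its local list only, no caller-visible mutation.

-- ===== PORT A =====
def construct_context_and_title (documents : List (String × List String)) (supporting_titles : List String) (answer_text : String) : Option String × Option String :=
  let supporting_docs0 := documents.filter (fun x => supporting_titles.contains x.1)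
  let supporting_docs := supporting_docs0.map (fun x => (x.1, PySem.Str.join "" x.2))
  if !(supporting_docs.map (fun x => PySem.Str.isIn answer_text x.2)).any id then
    (none, none)
  else
    let sortedDocs := PySem.List.sorted supporting_docs (fun x => PySem.Str.isIn answer_text x.2) true
    match PySem.List.pyGet? sortedDocs 0, PySem.List.pyGet? sortedDocs 1 with
    | some d0, some d1 =>
        (some (PySem.Str.join " " [d0.2, d1.2]), some (PySem.Str.join ", " [d0.1, d1.1]))
    | _, _ => (none, none)   -- Python raises IndexError here (fewer than two supporting docs); excluded by Pre_

-- ===== PORT B =====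
-- the loop body of Source B: route one document into the (front, back) accumulator pair
def pvRoute (supporting_titles : List String) (answer_text : String)
    (acc : List (String × String) × List (String × String)) (d : String × List String) :
    List (String × String) × List (String × String) :=
  if supporting_titles.contains d.1 then
    let text := PySem.Str.join "" d.2
    if PySem.Str.isIn answer_text text then (acc.1 ++ [(d.1, text)], acc.2)
    else (acc.1, acc.2 ++ [(d.1, text)])
  else acc

def construct_context_and_title_alt (documents : List (String × List String)) (supporting_titles : List String) (answer_text : String) : Option String × Option String :=
  let fb := documents.foldl (pvRoute supporting_titles answer_text) ([], [])
  if fb.1.isEmpty then (none, none)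
  else
    let ordered := fb.1 ++ fb.2
    match PySem.List.pyGet? ordered 0 with
    | none => (none, none)   -- Python raises IndexError (fewer than two supporting docs); excluded by Pre_
    | some d0 =>
      match PySem.List.pyGet? ordered 1 with
      | none => (none, none)   -- Python raises IndexError; excluded by Pre_
      | some d1 =>
          (some (PySem.Str.join " " [d0.2, d1.2]), some (PySem.Str.join ", " [d0.1, d1.1]))

-- ===== PRECONDITION & SPEC =====
-- Pre_ excludes exactly the inputs where both Pythons raise IndexError: some supporting doc
-- contains the answer but fewer than two documents have a title in supporting_titles.
def Pre_construct_context_and_title (documents : List (String × List String)) (supporting_titles : List String) (answer_text : String) : Prop :=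
  (documents.any (fun x => supporting_titles.contains x.1 && PySem.Str.isIn answer_text (PySem.Str.join "" x.2))) = true →
  2 ≤ (documents.filter (fun x => supporting_titles.contains x.1)).length
instance (documents : List (String × List String)) (supporting_titles : List String) (answer_text : String) : Decidable (Pre_construct_context_and_title documents supporting_titles answer_text) := by unfold Pre_construct_context_and_title; infer_instance

def pvWitness_construct_context_and_title : (List (String × List String)) × List String × String :=
  ([("t", ["a b"]), ("u", ["c"])], ["t", "u"], "a")

def Spec_construct_context_and_title (documents : List (String × List String)) (supporting_titles : List String) (answer_text : String) (out : Option String × Option String) : Prop := out = construct_context_and_title_alt documents supporting_titles answer_text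
instance (documents : List (String × List String)) (supporting_titles : List String) (answer_text : String) (out : Option String × Option String) : Decidable (Spec_construct_context_and_title documents supporting_titles answer_text out) := by unfold Spec_construct_context_and_title; infer_instance

-- ===== CLAIM (what is proved, stated in full; the proofs are below) =====
def Claim_equal_construct_context_and_title : Prop := ∀ (documents : List (String × List String)) (supporting_titles : List String) (answer_text : String), Dom_construct_context_and_title documents supporting_titles answer_text → Pre_construct_context_and_title documents supporting_titles answer_text → Spec_construct_context_and_title documents supporting_titles answer_text (construct_context_and_title documents supporting_titles answer_text)

-- ===== LEMMAS AND PROOFS =====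

-- inserting x into F ++ B (F all-true, B all-false under p) with A's reverse-sort comparator
theorem insertBy_bool_partition {α : Type} (p : α → Bool) (x : α) (F B : List α)
    (hF : ∀ y ∈ F, p y = true) (hB : ∀ y ∈ B, p y = false) :
    PySem.List.insertBy (fun a b => decide (p b < p a)) x (F ++ B) =
      if p x then F ++ x :: B else (F ++ B) ++ [x] := by
  cases hx : p x with
  | false =>
      rw [PySem.List.insertBy_of_forall_not_before]
      · simp
      · intro y _
        simp [hx, Bool.lt_iff]
  | true =>
      simp only []
      induction F with
      | nil =>
          cases B with
          | nil => simp [PySem.List.insertBy]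
          | cons y ys =>
              have hy := hB y (by simp)
              simp [PySem.List.insertBy, Bool.lt_iff, hy, hx]
      | cons f F ih =>
          have hf : p f = true := hF f (by simp)
          have ih' : PySem.List.insertBy (fun a b => decide (p b < p a)) x (F ++ B) = F ++ x :: B := by
            simpa using ih (fun y hy => hF y (by simp [hy]))
          have hcond : decide (p f < p x) = false := by simp [hf, hx]
          simp only [List.cons_append, PySem.List.insertBy, hcond]
          simp [ih']

theorem foldl_insertBy_partition {α : Type} (p : α → Bool) (S F B : List α)
    (hF : ∀ y ∈ F, p y = true) (hB : ∀ y ∈ B, p y = false) :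
    S.foldl (fun acc x => PySem.List.insertBy (fun a b => decide (p b < p a)) x acc) (F ++ B) =
      (F ++ S.filter p) ++ (B ++ S.filter (fun x => !p x)) := by
  induction S generalizing F B with
  | nil => simp
  | cons x S ih =>
      simp only [List.foldl_cons]
      rw [insertBy_bool_partition p x F B hF hB]
      cases hx : p x with
      | true =>
          have hF' : ∀ y ∈ F ++ [x], p y = true := by
            intro y hy
            rcases List.mem_append.1 hy with h | h
            · exact hF y h
            · simp_all
          have h1 : F ++ x :: B = (F ++ [x]) ++ B := by simp
          rw [if_pos rfl, h1, ih (F ++ [x]) B hF' hB]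
          simp [hx]
      | false =>
          have hB' : ∀ y ∈ B ++ [x], p y = false := by
            intro y hy
            rcases List.mem_append.1 hy with h | h
            · exact hB y h
            · simp_all
          have h1 : (F ++ B) ++ [x] = F ++ (B ++ [x]) := by simp
          rw [if_neg (by simp), h1, ih F (B ++ [x]) hF hB']
          simp [hx]

-- A's stable reverse sort on a boolean key IS the stable partition
theorem sorted_bool_rev_eq_partition {α : Type} (p : α → Bool) (S : List α) :
    PySem.List.sorted S p true = S.filter p ++ S.filter (fun x => !p x) := by
  rw [PySem.List.sorted_rev_eq_foldl_insertBy]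
  have := foldl_insertBy_partition p S [] [] (by simp) (by simp)
  simpa using this

-- B's single-pass fold computes the two filtered halves of A's supporting_docs list
theorem foldl_route_eq_filters (supporting_titles : List String) (answer_text : String)
    (documents : List (String × List String)) (F B : List (String × String)) :
    documents.foldl (pvRoute supporting_titles answer_text) (F, B) =
      (F ++ ((documents.filter (fun x => supporting_titles.contains x.1)).map
              (fun x => (x.1, PySem.Str.join "" x.2))).filter (fun x => PySem.Str.isIn answer_text x.2),
       B ++ ((documents.filter (fun x => supporting_titles.contains x.1)).map
              (fun x => (x.1, PySem.Str.join "" x.2))).filter (fun x => !PySem.Str.isIn answer_text x.2)) := by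
  induction documents generalizing F B with
  | nil => simp
  | cons d ds ih =>
      simp only [List.foldl_cons]
      by_cases hc : supporting_titles.contains d.1
      · have hc' : d.1 ∈ supporting_titles := by simpa using hc
        by_cases hp : PySem.Str.isIn answer_text (PySem.Str.join "" d.2)
        · have hp' : PySem.Chars.isIn answer_text.toList (PySem.Str.join "" d.2).toList = true := by
            simpa using hp
          rw [PySem.Str.toList_join, show ("".toList : List Char) = [] from rfl] at hp'
          rw [show pvRoute supporting_titles answer_text (F, B) d
              = (F ++ [(d.1, PySem.Str.join "" d.2)], B) by
                simp only [pvRoute]; rw [if_pos hc, if_pos hp]]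
          rw [ih]
          simp [List.filter_cons, hc', hp']
        · have hp' : PySem.Chars.isIn answer_text.toList (PySem.Str.join "" d.2).toList = false := by
            simpa using hp
          rw [PySem.Str.toList_join, show ("".toList : List Char) = [] from rfl] at hp'
          rw [show pvRoute supporting_titles answer_text (F, B) d
              = (F, B ++ [(d.1, PySem.Str.join "" d.2)]) by
                simp only [pvRoute]; rw [if_pos hc, if_neg hp]]
          rw [ih]
          simp [List.filter_cons, hc', hp']
      · have hc' : ¬ d.1 ∈ supporting_titles := by simpa using hc
        rw [show pvRoute supporting_titles answer_text (F, B) d = (F, B) by simp only [pvRoute]; rw [if_neg hc]]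
        rw [ih]
        simp [List.filter_cons, hc']

-- ===== VERDICT (by name: the statement is the Claim_ definition above) =====
theorem construct_context_and_title_spec : Claim_equal_construct_context_and_title := by
  intro documents supporting_titles answer_text _hDom _hPre
  unfold Spec_construct_context_and_title construct_context_and_title construct_context_and_title_alt
  simp only []
  set S := (documents.filter (fun x => supporting_titles.contains x.1)).map
      (fun x => (x.1, PySem.Str.join "" x.2)) with hS
  set p : String × String → Bool := fun x => PySem.Str.isIn answer_text x.2 with hp
  have hfold : documents.foldl (pvRoute supporting_titles answer_text) ([], []) =
      (S.filter p, S.filter (fun x => !p x)) := by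
    simpa [hS, hp] using foldl_route_eq_filters supporting_titles answer_text documents [] []
  rw [hfold]
  have hany : (S.map (fun x => PySem.Str.isIn answer_text x.2)).any id = S.any p := by
    simp [List.any_map, hp]
  have hempty : (S.filter p).isEmpty = !(S.any p) := by
    rw [Bool.eq_iff_iff]
    simp [List.isEmpty_iff, List.filter_eq_nil_iff, List.any_eq_false]
  rw [hany, hempty]
  cases h : S.any p with
  | false => simp
  | true =>
      simp only [Bool.not_true, Bool.false_eq_true, if_false]
      rw [sorted_bool_rev_eq_partition p S]
      rcases PySem.List.pyGet? (S.filter p ++ S.filter (fun x => !p x)) 0 with _ | d0 <;>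
        rcases PySem.List.pyGet? (S.filter p ++ S.filter (fun x => !p x)) 1 with _ | d1 <;> rfl
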